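-- pv_equiv track=rewrite | github.com/Dav-exe/Kinvenus_2023 | testing_ground.py | process_data
-- ===== SOURCE A (Python) =====
-- def process_data(data):
--     data_list = data.split("\n")
--     arrays = []
--     current_array = []
--
--     for line in data_list:
--         if line.startswith("ALTITUDE"):
--             if current_array:
--                 arrays.append(current_array)
--                 current_array = []
--             current_array.append(line.split())
--         else:
--             current_array.append(line.split())
--
--     arrays.append(current_array)
--
--     final_arrays = []
--     for i, array in enumerate(arrays):
--         temp_array = []
--         for line in array:
--             temp_array.append(line)
--         final_arrays.append(temp_array)
--
--     return final_arrays
-- ===== SOURCE B (Python) =====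
-- def process_data(data):
--     def split_head(lines):
--         # first line plus the following non-ALTITUDE lines, and the remainder
--         for j in range(1, len(lines)):
--             if lines[j].startswith("ALTITUDE"):
--                 return lines[:j], lines[j:]
--         return lines, []
--
--     def groups(lines):
--         head, rest = split_head(lines)
--         g = [line.split() for line in head]
--         return [g] + (groups(rest) if rest else [])
--
--     return groups(data.split("\n"))
-- ===== Notes on version B (the rewrite author's own statement) =====
-- stated objective: simpler
-- what changed: A's single-pass accumulator loop with flush-on-ALTITUDE plus a redundant copy loop is replaced by a recursive decomposition that repeatedly splits off the first group (first line plus following non-ALTITUDE lines) and recurses on the remainder.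
import Mathlib
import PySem

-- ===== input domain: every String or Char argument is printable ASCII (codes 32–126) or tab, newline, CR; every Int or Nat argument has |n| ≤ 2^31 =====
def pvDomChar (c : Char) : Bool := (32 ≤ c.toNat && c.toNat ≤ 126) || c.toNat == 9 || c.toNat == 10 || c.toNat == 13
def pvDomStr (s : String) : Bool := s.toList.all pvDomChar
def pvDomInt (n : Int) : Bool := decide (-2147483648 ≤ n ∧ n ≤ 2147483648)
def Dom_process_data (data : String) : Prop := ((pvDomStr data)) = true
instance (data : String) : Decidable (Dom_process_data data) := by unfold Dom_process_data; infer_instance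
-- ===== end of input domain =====

-- B replaces A's accumulator loop (plus a redundant copy loop) by a recursive
-- split-off-the-first-group decomposition; objective: simpler, same cost.

-- data.split("\n")  (sep ≠ "", exact Python semantics)
def pvLines (data : String) : List String :=
  (PySem.Chars.splitOn data.toList ['\n']).map (fun cs => String.ofList cs)

-- line.split()
def pvTok (line : String) : List String := PySem.Str.split₀ line

-- ===== PORT A =====
-- the body of A's for-loop, on state (arrays, current_array)
def pvStepA (st : List (List (List String)) × List (List String)) (line : String) :
    List (List (List String)) × List (List String) :=
  if PySem.Str.startswith line "ALTITUDE" then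
    if st.2.isEmpty then (st.1, st.2 ++ [pvTok line])
    else (st.1 ++ [st.2], [pvTok line])
  else (st.1, st.2 ++ [pvTok line])

def process_data (data : String) : List (List (List String)) :=
  let data_list := pvLines data
  let st := data_list.foldl pvStepA ([], [])
  let arrays := st.1 ++ [st.2]
  -- the final copy loop of A
  arrays.foldl (fun final_arrays array =>
    final_arrays ++ [array.foldl (fun temp_array line => temp_array ++ [line]) []]) []

-- ===== PORT B =====
-- groups: the first line plus following non-ALTITUDE lines form one group; recurse on the rest
def pvGroupsB : List String → List (List (List String))
  | [] => [[]]
  | l :: ls =>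
    let head := l :: ls.takeWhile (fun s => !PySem.Str.startswith s "ALTITUDE")
    let rest := ls.dropWhile (fun s => !PySem.Str.startswith s "ALTITUDE")
    (head.map pvTok) :: (if rest.isEmpty then [] else pvGroupsB rest)
  termination_by lines => lines.length
  decreasing_by
    exact Nat.lt_succ_of_le (List.length_dropWhile_le _ _)

def process_data_alt (data : String) : List (List (List String)) :=
  pvGroupsB (pvLines data)

-- ===== PRECONDITION & SPEC =====
def Spec_process_data (data : String) (out : List (List (List String))) : Prop := out = process_data_alt data
instance (data : String) (out : List (List (List String))) : Decidable (Spec_process_data data out) := by unfold Spec_process_data; infer_instance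

-- ===== CLAIM (what is proved, stated in full; the proofs are below) =====
def Claim_equal_process_data : Prop := ∀ (data : String), Dom_process_data data → Spec_process_data data (process_data data)

-- ===== LEMMAS AND PROOFS =====

-- foldl that pushes f x onto the accumulator builds acc ++ map f
theorem pv_foldl_push {α β : Type} (f : α → β) :
    ∀ (l : List α) (acc : List β),
      l.foldl (fun t x => t ++ [f x]) acc = acc ++ l.map f := by
  intro l
  induction l with
  | nil => intro acc; simp
  | cons x xs ih => intro acc; simp [List.foldl, ih]

-- the copy loop of A is the identity
theorem pv_copy_id (arrays : List (List (List String))) :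
    arrays.foldl (fun final_arrays array =>
      final_arrays ++ [array.foldl (fun temp_array line => temp_array ++ [line]) []]) []
    = arrays := by
  have h : ∀ a : List (List String),
      a.foldl (fun temp_array line => temp_array ++ [line]) [] = a := by
    intro a
    simpa using pv_foldl_push (id) a []
  calc arrays.foldl (fun final_arrays array =>
        final_arrays ++ [array.foldl (fun temp_array line => temp_array ++ [line]) []]) []
      = [] ++ arrays.map (fun array =>
          array.foldl (fun temp_array line => temp_array ++ [line]) []) :=
        pv_foldl_push _ arrays []
    _ = arrays := by simp [h]

-- proof-only recursive characterisation of A's loop from a nonempty current_array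
def pvConsume (cur : List (List String)) : List String → List (List (List String))
  | [] => [cur]
  | l :: ls =>
    if PySem.Str.startswith l "ALTITUDE" then cur :: pvConsume [pvTok l] ls
    else pvConsume (cur ++ [pvTok l]) ls

theorem pv_foldA_consume :
    ∀ (lines : List String) (arrays : List (List (List String))) (cur : List (List String)),
      cur ≠ [] →
      (lines.foldl pvStepA (arrays, cur)).1 ++ [(lines.foldl pvStepA (arrays, cur)).2]
        = arrays ++ pvConsume cur lines := by
  intro lines
  induction lines with
  | nil => intro arrays cur _; simp [pvConsume]
  | cons l ls ih =>
    intro arrays cur hcur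
    by_cases hp : PySem.Str.startswith l "ALTITUDE" = true
    · have hp' := hp; simp at hp'
      have hstep : pvStepA (arrays, cur) l = (arrays ++ [cur], [pvTok l]) := by
        simp [pvStepA, hp', List.isEmpty_iff, hcur]
      simp only [List.foldl, hstep, pvConsume, hp, if_pos]
      rw [ih (arrays ++ [cur]) [pvTok l] (by simp)]
      simp
    · have hp' := hp; simp at hp'
      have hstep : pvStepA (arrays, cur) l = (arrays, cur ++ [pvTok l]) := by
        simp [pvStepA, hp']
      simp only [List.foldl, hstep, pvConsume, hp]
      rw [ih arrays (cur ++ [pvTok l]) (by simp)]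
      simp

theorem pv_consume_groups :
    ∀ (lines : List String) (cur : List (List String)),
      pvConsume cur lines
        = (cur ++ (lines.takeWhile (fun s => !PySem.Str.startswith s "ALTITUDE")).map pvTok)
            :: (if (lines.dropWhile (fun s => !PySem.Str.startswith s "ALTITUDE")).isEmpty
                then [] else pvGroupsB (lines.dropWhile (fun s => !PySem.Str.startswith s "ALTITUDE"))) := by
  intro lines
  induction lines with
  | nil => intro cur; simp [pvConsume]
  | cons l ls ih =>
    intro cur
    by_cases hp : PySem.Str.startswith l "ALTITUDE" = true
    · simp only [pvConsume, hp, if_pos, List.takeWhile, List.dropWhile, Bool.not_true]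
      rw [ih [pvTok l]]
      simp [pvGroupsB]
    · simp only [pvConsume, hp, List.takeWhile, List.dropWhile, Bool.not_false]
      rw [ih (cur ++ [pvTok l])]
      simp

theorem pv_splitOn_go_ne_nil (sep : List Char) :
    ∀ (fuel : Nat) (l cur : List Char) (acc : List (List Char)),
      PySem.Chars.splitOn.go sep fuel l cur acc ≠ [] := by
  intro fuel
  induction fuel with
  | zero => intro l cur acc; simp [PySem.Chars.splitOn.go]
  | succ n ih =>
    intro l cur acc
    cases l with
    | nil => simp [PySem.Chars.splitOn.go]
    | cons c rest =>
      simp only [PySem.Chars.splitOn.go]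
      split <;> apply ih

theorem pv_lines_ne_nil (data : String) : pvLines data ≠ [] := by
  unfold pvLines PySem.Chars.splitOn
  intro h
  exact pv_splitOn_go_ne_nil _ _ _ _ _ (List.map_eq_nil_iff.mp h)

-- ===== VERDICT (by name: the statement is the Claim_ definition above) =====
theorem process_data_spec : Claim_equal_process_data := by
  intro data _
  unfold Spec_process_data process_data process_data_alt
  rcases h : pvLines data with _ | ⟨l, ls⟩
  · exact absurd h (pv_lines_ne_nil data)
  · simp only
    rw [pv_copy_id]
    have hfirst : pvStepA ([], []) l = ([], [pvTok l]) := by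
      by_cases hp : PySem.Str.startswith l "ALTITUDE" = true <;> simp [pvStepA]
    rw [List.foldl_cons, hfirst,
      pv_foldA_consume ls [] [pvTok l] (by simp),
      pv_consume_groups ls [pvTok l]]
    simp [pvGroupsB]
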